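-- pv_equiv track=rewrite | github.com/emanuellegrody/SALVEseq | extractionScripts/submissionScripts/EGS001/postSeqIO_20250120.py | find_closest_barcode
-- ===== SOURCE A (Python) =====
-- def find_closest_barcode(barcode: str, whitelist: set) -> str:
--     """Find closest barcode in whitelist with Hamming distance 1."""
--     if not isinstance(barcode, str):
--         return None
--
--     if barcode in whitelist:
--         return barcode
--
--     for i in range(len(barcode)):
--         for base in 'ACGT':
--             if base != barcode[i]:
--                 candidate = barcode[:i] + base + barcode[i + 1:]
--                 if candidate in whitelist:
--                     return candidate
--     return None
-- ===== SOURCE B (Python) =====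
-- def find_closest_barcode(barcode: str, whitelist: set) -> str:
--     """Find closest barcode in whitelist with Hamming distance 1."""
--     if not isinstance(barcode, str):
--         return None
--
--     if barcode in whitelist:
--         return barcode
--
--     for w in whitelist:
--         if len(w) == len(barcode) and sum(x != y for x, y in zip(w, barcode)) == 1:
--             return w
--     return None
-- ===== Notes on version B (the rewrite author's own statement) =====
-- stated objective: faster
-- what changed: B scans the whitelist once and returns the first entry at Hamming distance 1 from the barcode, instead of building and testing each of the 4*L single-substitution neighbor strings; Pre_ excludes inputs where the barcode is absent and the whitelist holds two distinct distance-1 entries (a tie: A picks by neighbor order, B by whitelist order) or a distance-1 entry whose differing character is not an ACGT base (A ignores it, B returns it).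
-- outside the precondition, e.g. on find_closest_barcode('AA', {'CA', 'AC'}): A returns 'CA', B returns 'AC'; on find_closest_barcode('AA', {'AN'}): A returns None, B returns 'AN'
import Mathlib
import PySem

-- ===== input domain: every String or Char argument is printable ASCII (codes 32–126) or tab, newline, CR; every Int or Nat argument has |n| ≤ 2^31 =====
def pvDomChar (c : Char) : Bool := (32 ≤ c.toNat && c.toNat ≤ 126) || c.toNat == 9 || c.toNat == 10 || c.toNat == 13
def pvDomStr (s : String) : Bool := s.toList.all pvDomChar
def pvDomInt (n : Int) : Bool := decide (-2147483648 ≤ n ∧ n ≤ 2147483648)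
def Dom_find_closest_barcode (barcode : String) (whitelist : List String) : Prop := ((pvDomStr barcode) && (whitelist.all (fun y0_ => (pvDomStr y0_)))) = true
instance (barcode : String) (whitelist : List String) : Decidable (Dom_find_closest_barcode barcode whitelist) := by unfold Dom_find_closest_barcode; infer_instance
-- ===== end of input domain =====

-- B returns the first whitelist entry at Hamming distance 1 from the barcode (one scan of the
-- whitelist) instead of A's build-and-test of the 4·L single-substitution neighbors of the barcode;
-- Pre_ excludes the tie/non-ACGT corners where their picks may differ. Lean's typing makes Python's
-- isinstance guard vacuous.

-- ===== PORT A =====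
-- the string 'ACGT' iterated character by character (exact)
def pvACGT : List Char := ['A', 'C', 'G', 'T']

-- barcode[i] for i in range(len(barcode)) is always in range, so getD is exact there;
-- the slices barcode[:i] and barcode[i+1:] with 0 ≤ i < len are exactly take i / drop (i+1).
def find_closest_barcode (barcode : String) (whitelist : List String) : Option String :=
  if barcode ∈ whitelist then some barcode
  else
    (List.range barcode.toList.length).findSome? (fun i =>
      pvACGT.findSome? (fun base =>
        if base ≠ barcode.toList.getD i ' ' then
          let candidate := String.ofList
            (barcode.toList.take i ++ base :: barcode.toList.drop (i + 1))
          if candidate ∈ whitelist then some candidate else none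
        else none))

-- ===== PORT B =====
-- len(w) == len(barcode) and sum(x != y for x, y in zip(w, barcode)) == 1  (exact: zip truncates,
-- but the length guard makes the truncation vacuous)
def pvDist1 (bc w : List Char) : Bool :=
  w.length == bc.length &&
  (w.zip bc).countP (fun p => decide (p.1 ≠ p.2)) == 1

-- B's for-loop with early return over the whitelist is find?
def find_closest_barcode_alt (barcode : String) (whitelist : List String) : Option String :=
  if barcode ∈ whitelist then some barcode
  else whitelist.find? (fun w => pvDist1 barcode.toList w.toList)

-- ===== PRECONDITION & SPEC =====
-- Pre_ excludes inputs where the barcode is absent from the whitelist and the whitelist either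
-- holds two DISTINCT entries at Hamming distance 1 from the barcode (a tie no caller specifies:
-- A picks by its neighbor-enumeration order, B by whitelist order) or holds a distance-1 entry
-- whose differing character is not an ACGT base (A ignores such an entry, B returns it).
def Pre_find_closest_barcode (barcode : String) (whitelist : List String) : Prop :=
  barcode ∈ whitelist ∨
  ((∀ w ∈ whitelist, ∀ w' ∈ whitelist, pvDist1 barcode.toList w.toList = true →
      pvDist1 barcode.toList w'.toList = true → w = w') ∧
   (∀ w ∈ whitelist, pvDist1 barcode.toList w.toList = true →
      ∀ p ∈ w.toList.zip barcode.toList, p.1 ≠ p.2 → p.1 ∈ (['A', 'C', 'G', 'T'] : List Char)))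
instance (barcode : String) (whitelist : List String) : Decidable (Pre_find_closest_barcode barcode whitelist) := by unfold Pre_find_closest_barcode; infer_instance

def pvWitness_find_closest_barcode : String × List String := ("AA", ["AT"])

def Spec_find_closest_barcode (barcode : String) (whitelist : List String) (out : Option String) : Prop := out = find_closest_barcode_alt barcode whitelist
instance (barcode : String) (whitelist : List String) (out : Option String) : Decidable (Spec_find_closest_barcode barcode whitelist out) := by unfold Spec_find_closest_barcode; infer_instance

-- ===== CLAIM (what is proved, stated in full; the proofs are below) =====
def Claim_equal_find_closest_barcode : Prop := ∀ (barcode : String) (whitelist : List String), Dom_find_closest_barcode barcode whitelist → Pre_find_closest_barcode barcode whitelist → Spec_find_closest_barcode barcode whitelist (find_closest_barcode barcode whitelist)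

-- ===== LEMMAS AND PROOFS =====

-- the single-substitution neighbor barcode[:i] + c + barcode[i+1:]
def pvCand (bc : List Char) (i : Nat) (c : Char) : List Char :=
  bc.take i ++ c :: bc.drop (i + 1)

-- index-wise mismatch list, the proof-side view of the zip count
def pvDiffs (bc w : List Char) : List Nat :=
  (List.range w.length).filter (fun p => w.getD p ' ' ≠ bc.getD p ' ')

theorem cand_length (bc : List Char) (i : Nat) (c : Char) (h : i < bc.length) :
    (pvCand bc i c).length = bc.length := by
  simp [pvCand]; omega

theorem cand_getD (bc : List Char) (i : Nat) (c : Char) (d : Char) (h : i < bc.length)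
    (p : Nat) (hp : p < bc.length) :
    (pvCand bc i c).getD p d = if p = i then c else bc.getD p d := by
  unfold pvCand
  have hti : (bc.take i).length = i := by simp; omega
  rcases Nat.lt_trichotomy p i with hlt | heq | hgt
  · rw [if_neg (by omega)]
    rw [List.getD_eq_getElem?_getD, List.getD_eq_getElem?_getD,
      List.getElem?_append_left (by omega), List.getElem?_take_of_lt hlt]
  · subst heq
    rw [if_pos rfl, List.getD_eq_getElem?_getD,
      List.getElem?_append_right (by omega), hti]
    simp
  · rw [if_neg (by omega)]
    rw [List.getD_eq_getElem?_getD, List.getD_eq_getElem?_getD,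
      List.getElem?_append_right (by omega), hti]
    have h1 : p - i = (p - i - 1) + 1 := by omega
    rw [h1]
    simp only [List.getElem?_cons_succ, List.getElem?_drop]
    congr 2
    omega

theorem filter_range_eq_single (n i : Nat) (hi : i < n) (f : Nat → Bool)
    (hf : ∀ p, p < n → (f p = true ↔ p = i)) :
    (List.range n).filter f = [i] := by
  induction n with
  | zero => omega
  | succ m ih =>
    rw [List.range_succ, List.filter_append]
    by_cases hi' : i < m
    · rw [ih hi' (fun p hp => hf p (by omega))]
      have : f m = false := by
        have := hf m (by omega)
        rcases hfm : f m with _ | _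
        · rfl
        · exact absurd ((this).1 hfm) (by omega)
      simp [this]
    · have him : i = m := by omega
      subst him
      have h1 : (List.range i).filter f = [] := by
        apply List.filter_eq_nil_iff.2
        intro p hp
        have hp' : p < i := List.mem_range.mp hp
        have := hf p (by omega)
        rcases hfp : f p with _ | _
        · simp
        · exact absurd ((this).1 hfp) (by omega)
      rw [h1]
      simp [(hf i (by omega)).2 rfl]

theorem filter_eq_single {α : Type} (l : List α) (f : α → Bool) (a : α)
    (h : l.filter f = [a]) :
    a ∈ l ∧ f a = true ∧ ∀ x ∈ l, f x = true → x = a := by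
  induction l with
  | nil => simp at h
  | cons x l ih =>
    rw [List.filter_cons] at h
    by_cases hx : f x = true
    · rw [if_pos hx] at h
      have hxa : x = a := by
        have := List.head_eq_of_cons_eq h
        exact this
      have hrest : l.filter f = [] := List.tail_eq_of_cons_eq h
      subst hxa
      refine ⟨List.mem_cons_self, hx, ?_⟩
      intro y hy hfy
      rcases List.mem_cons.mp hy with rfl | hy'
      · rfl
      · exfalso
        have : y ∈ l.filter f := List.mem_filter.mpr ⟨hy', hfy⟩
        rw [hrest] at this
        simp at this
    · rw [if_neg hx] at h
      obtain ⟨ha, hfa, hall⟩ := ih h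
      refine ⟨List.mem_cons_of_mem _ ha, hfa, ?_⟩
      intro y hy hfy
      rcases List.mem_cons.mp hy with rfl | hy'
      · exact absurd hfy hx
      · exact hall y hy' hfy

theorem diffs_cand (bc : List Char) (i : Nat) (c : Char) (h : i < bc.length)
    (hc : c ≠ bc.getD i ' ') :
    pvDiffs bc (pvCand bc i c) = [i] := by
  unfold pvDiffs
  rw [cand_length bc i c h]
  apply filter_range_eq_single _ _ h
  intro p hp
  rw [cand_getD bc i c ' ' h p hp]
  by_cases hpi : p = i
  · subst hpi
    simp [← List.getD_eq_getElem?_getD, hc]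
  · simp [← List.getD_eq_getElem?_getD, hpi]

theorem countP_zip_eq (bc w : List Char) (h : w.length = bc.length) :
    (w.zip bc).countP (fun p => decide (p.1 ≠ p.2)) = (pvDiffs bc w).length := by
  unfold pvDiffs
  rw [List.countP_eq_length_filter]
  induction w generalizing bc with
  | nil => cases bc <;> simp_all
  | cons c w ih =>
    cases bc with
    | nil => simp at h
    | cons d bc =>
      have hlen : w.length = bc.length := by simpa using h
      rw [List.zip_cons_cons, List.filter_cons, List.length_cons,
        List.range_succ_eq_map, List.filter_cons, List.filter_map]
      have hcomp : ((List.range w.length).filter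
          (fun p => decide ((c :: w).getD (p + 1) ' ' ≠ (d :: bc).getD (p + 1) ' '))) =
          (List.range w.length).filter (fun p => decide (w.getD p ' ' ≠ bc.getD p ' ')) := by
        apply List.filter_congr
        intro p _
        simp
      simp only [List.getD_cons_zero, Function.comp_def, Nat.succ_eq_add_one, hcomp]
      by_cases hcd : c = d
      · rw [if_neg (by simp [hcd]), if_neg (by simp [hcd]), List.length_map, ih bc hlen]
      · rw [if_pos (by simp [hcd]), if_pos (by simp [hcd])]
        simp only [List.length_cons, List.length_map]
        rw [ih bc hlen]

theorem dist1_iff (bc w : List Char) :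
    pvDist1 bc w = true ↔ w.length = bc.length ∧ ∃ p, pvDiffs bc w = [p] := by
  unfold pvDist1
  constructor
  · intro h
    simp only [Bool.and_eq_true, beq_iff_eq] at h
    obtain ⟨hlen, hcnt⟩ := h
    refine ⟨hlen, ?_⟩
    rw [countP_zip_eq bc w hlen] at hcnt
    exact List.length_eq_one_iff.mp hcnt
  · rintro ⟨hlen, p, hp⟩
    simp only [Bool.and_eq_true, beq_iff_eq]
    refine ⟨hlen, ?_⟩
    rw [countP_zip_eq bc w hlen, hp]
    simp

theorem dist1_cand (bc : List Char) (i : Nat) (c : Char) (h : i < bc.length)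
    (hc : c ≠ bc.getD i ' ') :
    pvDist1 bc (pvCand bc i c) = true := by
  rw [dist1_iff]
  exact ⟨cand_length bc i c h, i, diffs_cand bc i c h hc⟩

theorem dist1_elim (bc w : List Char) (h : pvDist1 bc w = true) :
    ∃ p, p < bc.length ∧ w = pvCand bc p (w.getD p ' ') ∧
      w.getD p ' ' ≠ bc.getD p ' ' := by
  obtain ⟨hlen, p, hp⟩ := (dist1_iff bc w).mp h
  unfold pvDiffs at hp
  obtain ⟨hpmem, hpf, hall⟩ := filter_eq_single _ _ _ hp
  have hplt : p < w.length := List.mem_range.mp hpmem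
  have hpbc : p < bc.length := by omega
  have hcne : w.getD p ' ' ≠ bc.getD p ' ' := by simpa using hpf
  refine ⟨p, hpbc, ?_, hcne⟩
  apply List.ext_getElem
  · rw [cand_length bc p _ hpbc]; omega
  · intro q hq1 hq2
    have hqbc : q < bc.length := by
      rw [cand_length bc p _ hpbc] at hq2; exact hq2
    have hcget := cand_getD bc p (w.getD p ' ') ' ' hpbc q hqbc
    rw [List.getD_eq_getElem _ ' ' hq2] at hcget
    by_cases hqp : q = p
    · subst hqp
      rw [hcget, if_pos rfl, List.getD_eq_getElem w ' ' (by omega)]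
    · rw [hcget, if_neg hqp]
      have hwq : w.getD q ' ' = w[q] := List.getD_eq_getElem w ' ' (by omega)
      by_contra hne2
      have hx : decide (¬ w.getD q ' ' = bc.getD q ' ') = true := by
        simp only [decide_eq_true_eq]
        rw [hwq]
        exact hne2
      exact hqp (hall q (List.mem_range.mpr (by omega)) (by simpa using hx))

theorem mismatch_pair_mem (bc w : List Char) (p : Nat) (hlen : w.length = bc.length)
    (hp : p < bc.length) :
    (w.getD p ' ', bc.getD p ' ') ∈ w.zip bc := by
  have hpz : p < (w.zip bc).length := by
    rw [List.length_zip]; omega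
  have hz : (w.zip bc)[p]'hpz = (w[p]'(by omega), bc[p]'hp) := List.getElem_zip
  rw [List.getD_eq_getElem w ' ' (by omega), List.getD_eq_getElem bc ' ' hp, ← hz]
  exact List.getElem_mem hpz

-- ===== VERDICT (by name: the statement is the Claim_ definition above) =====
theorem find_closest_barcode_spec : Claim_equal_find_closest_barcode := by
  intro barcode whitelist _ hpre
  unfold Spec_find_closest_barcode find_closest_barcode find_closest_barcode_alt
  by_cases hmem : barcode ∈ whitelist
  · simp [hmem]
  · rw [if_neg hmem, if_neg hmem]
    rcases hpre with h | ⟨huniq, hacgt⟩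
    · exact absurd h hmem
    set bc := barcode.toList with hbc
    cases hB : whitelist.find? (fun w => pvDist1 bc w.toList) with
    | none =>
      have hall := List.find?_eq_none.mp hB
      rw [List.findSome?_eq_none_iff]
      intro i hi
      rw [List.findSome?_eq_none_iff]
      intro base _
      by_cases h1 : base ≠ bc.getD i ' '
      · rw [if_pos h1]
        by_cases h2 : String.ofList (bc.take i ++ base :: bc.drop (i + 1)) ∈ whitelist
        · exfalso
          have hd1 : pvDist1 bc (bc.take i ++ base :: bc.drop (i + 1)) = true :=
            dist1_cand bc i base (List.mem_range.mp hi) h1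
          exact hall _ h2 (by simpa using hd1)
        · exact if_neg h2
      · rw [if_neg h1]
    | some w =>
      have hwmem : w ∈ whitelist := List.mem_of_find?_eq_some hB
      have hwd : pvDist1 bc w.toList = true := by
        have := List.find?_some hB
        simpa using this
      obtain ⟨p, hp, hwc, hne⟩ := dist1_elim bc w.toList hwd
      have hwlen : w.toList.length = bc.length := ((dist1_iff bc w.toList).mp hwd).1
      have hcin : w.toList.getD p ' ' ∈ pvACGT := by
        have := hacgt w hwmem hwd (w.toList.getD p ' ', bc.getD p ' ')
          (mismatch_pair_mem bc w.toList p hwlen hp) hne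
        simpa [pvACGT] using this
      cases hA : (List.range bc.length).findSome? (fun i =>
          pvACGT.findSome? (fun base =>
            if base ≠ bc.getD i ' ' then
              let candidate := String.ofList (bc.take i ++ base :: bc.drop (i + 1))
              if candidate ∈ whitelist then some candidate else none
            else none)) with
      | none =>
        exfalso
        have h1 := List.findSome?_eq_none_iff.mp hA p (List.mem_range.mpr hp)
        have h2 := List.findSome?_eq_none_iff.mp h1 (w.toList.getD p ' ') hcin
        rw [if_pos hne] at h2
        have hcw : String.ofList (bc.take p ++ w.toList.getD p ' ' :: bc.drop (p + 1)) = w := by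
          have : pvCand bc p (w.toList.getD p ' ') = w.toList := hwc.symm
          rw [show bc.take p ++ w.toList.getD p ' ' :: bc.drop (p + 1)
              = pvCand bc p (w.toList.getD p ' ') from rfl, this, String.ofList_toList]
        rw [hcw] at h2
        simp [hwmem] at h2
      | some s =>
        obtain ⟨i, hi, hsi⟩ := List.exists_of_findSome?_eq_some hA
        obtain ⟨base, _, hsb⟩ := List.exists_of_findSome?_eq_some hsi
        by_cases h1 : base ≠ bc.getD i ' '
        swap
        · rw [if_neg h1] at hsb; exact absurd hsb (by simp)
        rw [if_pos h1] at hsb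
        by_cases h2 : String.ofList (bc.take i ++ base :: bc.drop (i + 1)) ∈ whitelist
        swap
        · simp only [h2, if_false] at hsb; exact absurd hsb (by simp)
        simp only [h2, if_true, Option.some.injEq] at hsb
        have hsd : pvDist1 bc s.toList = true := by
          rw [← hsb, String.toList_ofList]
          exact dist1_cand bc i base (List.mem_range.mp hi) h1
        have hsmem : s ∈ whitelist := by rw [← hsb]; exact h2
        rw [huniq s hsmem w hwmem hsd hwd]
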